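-- pv_equiv track=rewrite | github.com/uthree/ChatBot-AttnLSTM | responder.py | padding_after_eos
-- ===== SOURCE A (Python) =====
-- def padding_after_eos(ids, eos_idx=2, padding_idx=3):
--     eos = False
--     res = []
--     for id in ids:
--         if id == eos_idx:
--             eos = True
--         if eos:
--             res.append(padding_idx)
--         else:
--             res.append(id)
--     return res
-- ===== SOURCE B (Python) =====
-- def padding_after_eos(ids, eos_idx=2, padding_idx=3):
--     try:
--         i = ids.index(eos_idx)
--     except ValueError:
--         return list(ids)
--     return list(ids[:i]) + [padding_idx] * (len(ids) - i)
-- ===== Notes on version B (the rewrite author's own statement) =====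
-- stated objective: simpler
-- what changed: Replaces the per-element flag-and-branch scan with locate-then-splice: find the first eos index, keep the prefix verbatim and append a replicated padding block.
import Mathlib
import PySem

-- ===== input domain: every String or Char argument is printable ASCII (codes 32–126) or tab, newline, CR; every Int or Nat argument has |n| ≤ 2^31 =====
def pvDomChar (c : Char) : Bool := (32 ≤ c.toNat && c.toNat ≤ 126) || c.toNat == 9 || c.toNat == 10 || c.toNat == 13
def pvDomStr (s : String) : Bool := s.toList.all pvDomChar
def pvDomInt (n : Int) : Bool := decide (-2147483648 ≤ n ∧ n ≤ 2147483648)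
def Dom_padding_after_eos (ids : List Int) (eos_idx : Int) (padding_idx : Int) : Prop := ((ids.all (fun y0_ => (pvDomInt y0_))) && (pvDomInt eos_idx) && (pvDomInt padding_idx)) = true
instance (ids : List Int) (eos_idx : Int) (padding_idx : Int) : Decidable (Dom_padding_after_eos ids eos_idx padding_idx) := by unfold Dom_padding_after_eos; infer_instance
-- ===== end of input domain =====

-- B replaces A's per-element flag-and-branch scan with locate-then-splice (prefix ++ replicated padding); objective: simpler.

-- ===== PORT A =====
-- Python loop body: update the 'eos' flag, then append padding_idx or the id itself to 'res'.
def stepA (eos_idx padding_idx : Int) (st : Bool × List Int) (id : Int) : Bool × List Int :=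
  let eos := if id = eos_idx then true else st.1
  (eos, st.2 ++ [if eos then padding_idx else id])

-- A's loop with the 'eos' flag and accumulating 'res', as a foldl of stepA over (eos, res).
def padding_after_eos (ids : List Int) (eos_idx : Int) (padding_idx : Int) : List Int :=
  (ids.foldl (stepA eos_idx padding_idx) (false, [])).2

-- ===== PORT B =====
-- list.index via PySem.List.index? (none = ValueError caught → return ids unchanged);
-- otherwise ids[:i] ++ [padding_idx] * (len(ids) - i).
def padding_after_eos_alt (ids : List Int) (eos_idx : Int) (padding_idx : Int) : List Int :=
  match PySem.List.index? ids eos_idx with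
  | none => ids
  | some i => ids.take i ++ List.replicate (ids.length - i) padding_idx

-- ===== PRECONDITION & SPEC =====
def Spec_padding_after_eos (ids : List Int) (eos_idx : Int) (padding_idx : Int) (out : List Int) : Prop := out = padding_after_eos_alt ids eos_idx padding_idx
instance (ids : List Int) (eos_idx : Int) (padding_idx : Int) (out : List Int) : Decidable (Spec_padding_after_eos ids eos_idx padding_idx out) := by unfold Spec_padding_after_eos; infer_instance

-- ===== CLAIM (what is proved, stated in full; the proofs are below) =====
def Claim_equal_padding_after_eos : Prop := ∀ (ids : List Int) (eos_idx : Int) (padding_idx : Int), Dom_padding_after_eos ids eos_idx padding_idx → Spec_padding_after_eos ids eos_idx padding_idx (padding_after_eos ids eos_idx padding_idx)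

-- ===== LEMMAS AND PROOFS =====

-- Once the eos flag is true, the rest of A's loop appends only padding.
theorem loopA_true (eos_idx padding_idx : Int) (l : List Int) (acc : List Int) :
    l.foldl (stepA eos_idx padding_idx) (true, acc)
      = (true, acc ++ List.replicate l.length padding_idx) := by
  induction l generalizing acc with
  | nil => simp
  | cons x xs ih =>
      have hstep : stepA eos_idx padding_idx (true, acc) x = (true, acc ++ [padding_idx]) := by
        by_cases h : x = eos_idx <;> simp [stepA, h]
      rw [List.foldl_cons, hstep, ih]
      simp [List.replicate_succ, List.append_assoc]

-- A's loop from the initial (false, acc) state produces acc ++ B's result.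
theorem loopA_false (eos_idx padding_idx : Int) (l : List Int) (acc : List Int) :
    (l.foldl (stepA eos_idx padding_idx) (false, acc)).2
      = acc ++ padding_after_eos_alt l eos_idx padding_idx := by
  induction l generalizing acc with
  | nil => simp [padding_after_eos_alt, PySem.List.index?]
  | cons x xs ih =>
      by_cases hx : x = eos_idx
      · subst hx
        have hstep : stepA x padding_idx (false, acc) x = (true, acc ++ [padding_idx]) := by
          simp [stepA]
        rw [List.foldl_cons, hstep, loopA_true, padding_after_eos_alt,
            PySem.List.index?_cons_self]
        simp [List.replicate_succ, List.append_assoc]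
      · have hstep : stepA eos_idx padding_idx (false, acc) x = (false, acc ++ [x]) := by
          simp [stepA, hx]
        rw [List.foldl_cons, hstep, ih]
        rw [padding_after_eos_alt, padding_after_eos_alt,
            PySem.List.index?_cons_of_ne xs hx]
        cases h : PySem.List.index? xs eos_idx with
        | none => simp
        | some i =>
            have hle : i ≤ xs.length := by
              rcases PySem.List.getElem_of_index?_eq_some h with ⟨hk, _, _⟩
              omega
            simp only [Option.map_some, List.take_succ_cons, List.length_cons,
              List.cons_append, List.append_assoc]
            have : xs.length + 1 - (i + 1) = xs.length - i := by omega
            simp [this]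

-- ===== VERDICT (by name: the statement is the Claim_ definition above) =====
theorem padding_after_eos_spec : Claim_equal_padding_after_eos := by
  intro ids eos_idx padding_idx _
  show padding_after_eos ids eos_idx padding_idx = padding_after_eos_alt ids eos_idx padding_idx
  unfold padding_after_eos
  simpa using loopA_false eos_idx padding_idx ids []
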